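-- pv_equiv track=rewrite | github.com/kartikey-singh/Orthographic-Languages-Similarity-Measurements | Porter Stemmer/PorterStemmer.py | step1b1
-- ===== SOURCE A (Python) =====
-- vowels = ['a', 'e', 'i', 'o', 'u']
--
-- def find(word):
--     '''
--     Finding m
--     '''
--     cvc_str = cvc_pattern(word)
--     groups = 0
--     flag = 1
--     #flag is 1 until a vowel is found
--     vowel_found = 0
--     for letter in cvc_str:
--         if letter is 'v':
--             flag = 0
--             vowel_found = 1
--         elif not flag:
--             if vowel_found:
--                 groups += 1
--                 vowel_found = 0
--     return groups
--
-- def double_letters(word):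
--     '''
--     *d
--     '''
--     cvc_str = cvc_pattern(word)
--     if len(word) >= 2:
--         if word[-1] == word[-2] and cvc_str[-1] == 'c':
--             return True
--     return False
--
-- def cvc_pattern(word):
--     cvc_str = []
--     for index, letter in enumerate(word):
--         if letter in vowels:
--             cvc_str.append('v')
--         elif index > 0 and cvc_str[index-1] == 'c' and letter == 'y':
--             cvc_str.append('v')
--         else:
--             cvc_str.append('c')
--
--     return cvc_str
--
-- def cvc(word):
--     # *o here * is 0 or more due to fil(ing) case
--     cvc_str = cvc_pattern(word)
--     bad_letters = ['w', 'x', 'y']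
--     if len(word) >= 3:
--         if word[-1] in bad_letters:
--             return False
--         elif cvc_str[-1] == 'c' and cvc_str[-2] == 'v' and cvc_str[-3] == 'c':
--             return True
--     return False
--
-- def step1b1(word):
--     bad_letters = ['l', 's', 'z']
--     suffixes = ['at', 'bl', 'iz']
--     nsuffixes = ['ate', 'ble', 'ize']
--     for index, suffix in enumerate(suffixes):
--         if word.endswith(suffix):
--             return word[:-len(suffix)] + nsuffixes[index]
--     if double_letters(word) and (word[-1] not in bad_letters):
--         return word[:-1]
--     if find(word) == 1 and cvc(word):
--         return word + 'e'
--     return word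
-- ===== SOURCE B (Python) =====
-- def step1b1(word):
--     # each suffix rule at->ate, bl->ble, iz->ize just appends an 'e'
--     if word[-2:] in ('at', 'bl', 'iz'):
--         return word + 'e'
--     # one streaming pass with O(1) state: no cvc pattern list is ever built
--     m = 0                 # vowel-group count = number of v->c tag transitions
--     prev = 'c'            # tag of the previous character
--     t3 = t2 = t1 = None   # tags of the last three characters
--     for i, ch in enumerate(word):
--         tag = 'v' if ch in 'aeiou' or (i > 0 and prev == 'c' and ch == 'y') else 'c'
--         if prev == 'v' and tag == 'c':
--             m += 1
--         t3, t2, t1 = t2, t1, tag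
--         prev = tag
--     if len(word) >= 2 and word[-1] == word[-2] and t1 == 'c' and word[-1] not in 'lsz':
--         return word[:-1]
--     if m == 1 and len(word) >= 3 and word[-1] not in 'wxy' and (t3, t2, t1) == ('c', 'v', 'c'):
--         return word + 'e'
--     return word
-- ===== Notes on version B (the rewrite author's own statement) =====
-- stated objective: alternative
-- what changed: B replaces A's three helper functions (find, double_letters, cvc), each of which rebuilds the cvc pattern list and rescans it, by a single streaming pass with O(1) state (measure count, previous tag, last three tags) that never materialises the pattern, and collapses the three suffix replacements at->ate, bl->ble, iz->ize into one rule that appends the letter e.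
import Mathlib
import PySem

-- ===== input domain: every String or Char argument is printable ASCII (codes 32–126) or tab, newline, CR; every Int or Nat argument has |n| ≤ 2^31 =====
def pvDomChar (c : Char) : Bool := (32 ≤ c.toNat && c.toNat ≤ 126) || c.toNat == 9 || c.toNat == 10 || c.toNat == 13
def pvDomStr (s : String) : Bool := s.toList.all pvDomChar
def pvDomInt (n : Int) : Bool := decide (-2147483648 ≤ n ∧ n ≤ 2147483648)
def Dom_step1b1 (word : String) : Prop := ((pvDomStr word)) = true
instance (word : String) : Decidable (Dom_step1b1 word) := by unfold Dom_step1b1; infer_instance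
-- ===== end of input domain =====

-- B replaces A's three helper functions (find/double_letters/cvc, each of which rebuilds the
-- cvc pattern list) by ONE streaming pass with constant state (measure count + last three tags,
-- no pattern list at all), and notes that all three suffix rules just append an 'e'
-- (objective: alternative decomposition; same return value).

-- ===== PORT A =====
def pvVowels : List Char := ['a', 'e', 'i', 'o', 'u']

-- loop body of cvc_pattern (p = (index, letter)); the acc lookup cvc_str[index-1]
-- is guarded by index > 0 and always in range (len(acc) = index), so the getD default is never used
def pvCvcStep (cvcStr : List Char) (p : Int × Char) : List Char :=
  if p.2 ∈ pvVowels then cvcStr ++ ['v']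
  else if p.1 > 0 ∧ PySem.List.pyGetD cvcStr (p.1 - 1) ' ' = 'c' ∧ p.2 = 'y' then cvcStr ++ ['v']
  else cvcStr ++ ['c']

def pvCvcPattern (w : List Char) : List Char :=
  (PySem.List.enumerate w).foldl pvCvcStep []

-- loop body of find; state = (groups, flag, vowel_found)
def pvFindStep (st : Int × Int × Int) (letter : Char) : Int × Int × Int :=
  if letter = 'v' then (st.1, 0, 1)
  else if st.2.1 = 0 then
    (if st.2.2 ≠ 0 then (st.1 + 1, st.2.1, 0) else st)
  else st

def pvFind (w : List Char) : Int :=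
  ((pvCvcPattern w).foldl pvFindStep (0, 1, 0)).1

def pvDoubleLetters (w : List Char) : Bool :=
  let cvcStr := pvCvcPattern w
  if w.length ≥ 2 then
    if PySem.List.pyGet? w (-1) = PySem.List.pyGet? w (-2) ∧ PySem.List.pyGet? cvcStr (-1) = some 'c'
    then true else false
  else false

def pvCvc (w : List Char) : Bool :=
  let cvcStr := pvCvcPattern w
  if w.length ≥ 3 then
    if PySem.List.pyGetD w (-1) ' ' ∈ ['w', 'x', 'y'] then false
    else if PySem.List.pyGet? cvcStr (-1) = some 'c' ∧ PySem.List.pyGet? cvcStr (-2) = some 'v' ∧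
            PySem.List.pyGet? cvcStr (-3) = some 'c' then true
    else false
  else false

def pvNSuffixes : List (List Char) := [['a', 't', 'e'], ['b', 'l', 'e'], ['i', 'z', 'e']]

-- the 'for index, suffix in enumerate(suffixes)' loop with early return
def pvSuffixLoop (w : List Char) : List (Int × List Char) → Option (List Char)
  | [] => none
  | (index, suffix) :: rest =>
    if PySem.Chars.endswith w suffix then
      some (PySem.List.slice w none (some (-(suffix.length : Int))) ++ PySem.List.pyGetD pvNSuffixes index [])
    else pvSuffixLoop w rest

def step1b1 (word : String) : String :=
  let w := word.toList
  match pvSuffixLoop w (PySem.List.enumerate [['a', 't'], ['b', 'l'], ['i', 'z']]) with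
  | some r => String.ofList r
  | none =>
    if pvDoubleLetters w = true ∧ PySem.List.pyGetD w (-1) ' ' ∉ ['l', 's', 'z'] then
      String.ofList (PySem.List.slice w none (some (-1)))
    else if pvFind w = 1 ∧ pvCvc w = true then
      String.ofList (w ++ ['e'])
    else String.ofList w

-- ===== PORT B =====
-- loop body of B's streaming pass; state = (i, prev, m, t3, t2, t1)
def pvStreamStep (st : Int × Char × Int × Option Char × Option Char × Option Char) (ch : Char) :
    Int × Char × Int × Option Char × Option Char × Option Char :=
  let tag := if ch ∈ ['a', 'e', 'i', 'o', 'u'] ∨ (st.1 > 0 ∧ st.2.1 = 'c' ∧ ch = 'y')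
             then 'v' else 'c'
  (st.1 + 1, tag,
   (if st.2.1 = 'v' ∧ tag = 'c' then st.2.2.1 + 1 else st.2.2.1),
   st.2.2.2.2.1, st.2.2.2.2.2, some tag)

def step1b1_alt (word : String) : String :=
  let w := word.toList
  if PySem.List.slice w (some (-2)) none ∈ [['a', 't'], ['b', 'l'], ['i', 'z']] then
    String.ofList (w ++ ['e'])
  else
    let st := w.foldl pvStreamStep (0, 'c', 0, none, none, none)
    if w.length ≥ 2 ∧ PySem.List.pyGet? w (-1) = PySem.List.pyGet? w (-2) ∧
       st.2.2.2.2.2 = some 'c' ∧ PySem.List.pyGetD w (-1) ' ' ∉ ['l', 's', 'z'] then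
      String.ofList (PySem.List.slice w none (some (-1)))
    else if st.2.2.1 = 1 ∧ w.length ≥ 3 ∧ PySem.List.pyGetD w (-1) ' ' ∉ ['w', 'x', 'y'] ∧
            (st.2.2.2.1, st.2.2.2.2.1, st.2.2.2.2.2) = (some 'c', some 'v', some 'c') then
      String.ofList (w ++ ['e'])
    else String.ofList w

-- ===== PRECONDITION & SPEC =====
def Spec_step1b1 (word : String) (out : String) : Prop := out = step1b1_alt word
instance (word : String) (out : String) : Decidable (Spec_step1b1 word out) := by unfold Spec_step1b1; infer_instance

-- ===== CLAIM (what is proved, stated in full; the proofs are below) =====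
def Claim_equal_step1b1 : Prop := ∀ (word : String), Dom_step1b1 word → Spec_step1b1 word (step1b1 word)

-- ===== LEMMAS AND PROOFS =====

-- proof-side helpers -------------------------------------------------------

-- spec of A's measure loop: number of v->c transitions, given a pending vowel group
def pvCountTrans (pending : Bool) : List Char → Int
  | [] => 0
  | c :: rest =>
    if c = 'v' then pvCountTrans true rest
    else (if pending then 1 else 0) + pvCountTrans false rest

-- number of v->c transitions between adjacent pattern entries
def pvZipCount (xs : List Char) : Int :=
  ((xs.zip xs.tail).countP (fun p => p.1 == 'v' && p.2 == 'c') : Nat)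

-- B's streaming state, expressed as a function of the pattern built so far
def pvStateOf (pat : List Char) : Int × Char × Int × Option Char × Option Char × Option Char :=
  ((pat.length : Int), pat.getLastD 'c', pvZipCount pat,
   PySem.List.pyGet? pat (-3), PySem.List.pyGet? pat (-2), PySem.List.pyGet? pat (-1))

-- appending one tag to the pattern ------------------------------------------

lemma pvZipCount_cons (a b : Char) (rest : List Char) :
    pvZipCount (a :: b :: rest) = (if a = 'v' ∧ b = 'c' then 1 else 0) + pvZipCount (b :: rest) := by
  by_cases h1 : a = 'v' <;> by_cases h2 : b = 'c' <;>
    simp [pvZipCount, List.countP_cons, h1, h2] <;> try ring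

lemma pvZipCount_concat : ∀ (acc : List Char) (c : Char),
    pvZipCount (acc ++ [c]) = pvZipCount acc +
      (if acc.getLastD 'c' = 'v' ∧ c = 'c' then 1 else 0) := by
  intro acc c
  induction acc with
  | nil => simp [pvZipCount]
  | cons a rest ih =>
    cases rest with
    | nil =>
      rw [show (([a] : List Char) ++ [c]) = a :: c :: [] from rfl, pvZipCount_cons]
      simp [pvZipCount, List.getLastD]
    | cons b rest'' =>
      rw [show ((a :: b :: rest'') ++ [c] : List Char) = a :: b :: (rest'' ++ [c]) from rfl,
          pvZipCount_cons a b (rest'' ++ [c]), pvZipCount_cons a b rest'',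
          show (b :: (rest'' ++ [c]) : List Char) = (b :: rest'') ++ [c] from rfl, ih]
      simp only [List.getLastD_cons]
      ring

lemma pvGet_neg_succ_concat (acc : List Char) (x : Char) (k : Nat) (hk : 0 < k) :
    PySem.List.pyGet? (acc ++ [x]) (-(((k + 1) : Nat) : Int)) = PySem.List.pyGet? acc (-((k : Nat) : Int)) := by
  by_cases h : k ≤ acc.length
  · rw [PySem.List.pyGet?_neg_natCast (acc ++ [x]) (k + 1) (by omega) (by simp; omega),
        PySem.List.pyGet?_neg_natCast acc k hk h]
    have hlen : (acc ++ [x]).length - (k + 1) = acc.length - k := by simp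
    rw [hlen, List.getElem?_append_left (by omega)]
  · rw [(PySem.List.pyGet?_eq_none_iff _ _).mpr, (PySem.List.pyGet?_eq_none_iff _ _).mpr]
    · unfold PySem.Raise.InRange; omega
    · unfold PySem.Raise.InRange; simp only [List.length_append, List.length_cons, List.length_nil]; omega

-- the streaming step tracks one pvCvcStep -------------------------------------

lemma pvStreamStep_eq (acc : List Char) (ch : Char) :
    pvStreamStep (pvStateOf acc) ch = pvStateOf (pvCvcStep acc ((acc.length : Int), ch)) := by
  have hcond : (ch ∈ ['a', 'e', 'i', 'o', 'u'] ∨ ((acc.length : Int) > 0 ∧ acc.getLastD 'c' = 'c' ∧ ch = 'y'))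
             ↔ (ch ∈ pvVowels ∨ ((acc.length : Int) > 0 ∧ PySem.List.pyGetD acc ((acc.length : Int) - 1) ' ' = 'c' ∧ ch = 'y')) := by
    apply or_congr
    · rw [pvVowels]
    · constructor
      · rintro ⟨h0, hl, hy⟩
        have hne : acc ≠ [] := by intro he; rw [he] at h0; simp at h0
        have hlen : 0 < acc.length := List.length_pos_iff.mpr hne
        refine ⟨h0, ?_, hy⟩
        rw [PySem.List.pyGetD_eq_getElem acc ' ' (by omega) (by omega)]
        rw [List.getLastD_eq_getLast?, List.getLast?_eq_getElem?] at hl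
        have h3 := List.getElem?_eq_getElem (l := acc) (i := acc.length - 1) (by omega)
        rw [h3] at hl
        simp at hl
        have h2 : ((acc.length : Int) - 1).toNat = acc.length - 1 := by omega
        simp only [h2]
        exact hl
      · rintro ⟨h0, hl, hy⟩
        have hne : acc ≠ [] := by intro he; rw [he] at h0; simp at h0
        have hlen : 0 < acc.length := List.length_pos_iff.mpr hne
        refine ⟨h0, ?_, hy⟩
        rw [PySem.List.pyGetD_eq_getElem acc ' ' (by omega) (by omega)] at hl
        rw [List.getLastD_eq_getLast?, List.getLast?_eq_getElem?]
        have h3 := List.getElem?_eq_getElem (l := acc) (i := acc.length - 1) (by omega)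
        rw [h3]
        have h2 : ((acc.length : Int) - 1).toNat = acc.length - 1 := by omega
        simp only [h2] at hl
        simp [hl]
  set cur := if ch ∈ pvVowels ∨ ((acc.length : Int) > 0 ∧ PySem.List.pyGetD acc ((acc.length : Int) - 1) ' ' = 'c' ∧ ch = 'y')
             then 'v' else 'c' with hcurdef
  have hA : pvCvcStep acc ((acc.length : Int), ch) = acc ++ [cur] := by
    rw [pvCvcStep, hcurdef]
    by_cases hA1 : ch ∈ pvVowels
    · rw [if_pos hA1, if_pos (Or.inl hA1)]
    · by_cases hA2 : ((acc.length : Int) > 0 ∧ PySem.List.pyGetD acc ((acc.length : Int) - 1) ' ' = 'c' ∧ ch = 'y')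
      · rw [if_neg hA1, if_pos hA2, if_pos (Or.inr hA2)]
      · rw [if_neg hA1, if_neg hA2, if_neg (by tauto)]
  rw [hA]
  have hcurp : (ch ∈ ['a', 'e', 'i', 'o', 'u'] ∨ ((acc.length : Int) > 0 ∧ acc.getLastD 'c' = 'c' ∧ ch = 'y')) → cur = 'v' := by
    intro hc; rw [hcurdef, if_pos (hcond.mp hc)]
  have hcurn : ¬(ch ∈ ['a', 'e', 'i', 'o', 'u'] ∨ ((acc.length : Int) > 0 ∧ acc.getLastD 'c' = 'c' ∧ ch = 'y')) → cur = 'c' := by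
    intro hc; rw [hcurdef, if_neg (fun hx => hc (hcond.mpr hx))]
  simp only [pvStreamStep, pvStateOf, Prod.mk.injEq]
  refine ⟨?_, ?_, ?_, ?_, ?_, ?_⟩
  · simp only [List.length_append, List.length_cons, List.length_nil]; push_cast; ring
  · rw [List.getLastD_concat]
    by_cases hc : (ch ∈ ['a', 'e', 'i', 'o', 'u'] ∨ ((acc.length : Int) > 0 ∧ acc.getLastD 'c' = 'c' ∧ ch = 'y'))
    · rw [if_pos hc, hcurp hc]
    · rw [if_neg hc, hcurn hc]
  · rw [pvZipCount_concat]
    by_cases hc : (ch ∈ ['a', 'e', 'i', 'o', 'u'] ∨ ((acc.length : Int) > 0 ∧ acc.getLastD 'c' = 'c' ∧ ch = 'y'))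
    · rw [if_pos hc, hcurp hc]
      simp
    · rw [if_neg hc, hcurn hc]
      split_ifs <;> ring
  · have h := pvGet_neg_succ_concat acc cur 2 (by omega)
    norm_num at h
    exact h.symm
  · have h := pvGet_neg_succ_concat acc cur 1 (by omega)
    norm_num at h
    exact h.symm
  · rw [PySem.List.pyGet?_neg_one_append_singleton]
    by_cases hc : (ch ∈ ['a', 'e', 'i', 'o', 'u'] ∨ ((acc.length : Int) > 0 ∧ acc.getLastD 'c' = 'c' ∧ ch = 'y'))
    · rw [if_pos hc, hcurp hc]
    · rw [if_neg hc, hcurn hc]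

-- shape of one pvCvcStep (used for lengths and the stream induction)
lemma pvCvcStep_shape (acc : List Char) (p : Int × Char) :
    pvCvcStep acc p = acc ++ ['v'] ∨ pvCvcStep acc p = acc ++ ['c'] := by
  rw [pvCvcStep]; split_ifs <;> simp

-- the whole streaming fold reproduces the pattern statistics ------------------

lemma pvStreamLoop : ∀ (rest acc : List Char),
    rest.foldl pvStreamStep (pvStateOf acc)
      = pvStateOf ((PySem.List.enumerate rest (acc.length : Int)).foldl pvCvcStep acc) := by
  intro rest
  induction rest with
  | nil => intro acc; simp [PySem.List.enumerate]
  | cons ch rest ih =>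
    intro acc
    rw [PySem.List.enumerate_cons]
    simp only [List.foldl_cons]
    rw [pvStreamStep_eq]
    rcases pvCvcStep_shape acc ((acc.length : Int), ch) with h | h <;> rw [h]
    · simpa [List.length_append] using ih (acc ++ ['v'])
    · simpa [List.length_append] using ih (acc ++ ['c'])

lemma pvStream_eq (w : List Char) :
    w.foldl pvStreamStep (0, 'c', 0, none, none, none) = pvStateOf (pvCvcPattern w) := by
  have h0 : pvStateOf [] = (0, 'c', 0, none, none, none) := by
    simp [pvStateOf, pvZipCount, PySem.List.pyGet?]
  have := pvStreamLoop w []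
  simp only [List.length_nil, Nat.cast_zero] at this
  rw [← h0, this, pvCvcPattern]

-- pattern facts ---------------------------------------------------------------

lemma pvCvcLoop_length : ∀ (rest : List (Int × Char)) (acc : List Char),
    (rest.foldl pvCvcStep acc).length = acc.length + rest.length := by
  intro rest
  induction rest with
  | nil => simp
  | cons p rest ih =>
    intro acc
    simp only [List.foldl_cons, ih]
    rcases pvCvcStep_shape acc p with h | h <;> rw [h] <;> simp <;> omega

lemma pvPattern_length (w : List Char) : (pvCvcPattern w).length = w.length := by
  rw [pvCvcPattern, pvCvcLoop_length]
  simp [PySem.List.length_enumerate]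

lemma pvCvcLoop_vc : ∀ (rest : List (Int × Char)) (acc : List Char),
    (∀ c ∈ acc, c = 'v' ∨ c = 'c') →
    ∀ c ∈ rest.foldl pvCvcStep acc, c = 'v' ∨ c = 'c' := by
  intro rest
  induction rest with
  | nil => intro acc h; simpa using h
  | cons p rest ih =>
    intro acc h
    simp only [List.foldl_cons]
    apply ih
    intro c hc
    rcases pvCvcStep_shape acc p with hs | hs <;> rw [hs] at hc <;>
      rcases List.mem_append.mp hc with h' | h' <;> first
        | exact h c h'
        | simp_all

lemma pvPattern_vc (w : List Char) : ∀ c ∈ pvCvcPattern w, c = 'v' ∨ c = 'c' := by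
  rw [pvCvcPattern]; exact pvCvcLoop_vc _ [] (by simp)

-- find = zip count ------------------------------------------------------------

lemma pvFindLoop : ∀ (pat : List Char) (g flag : Int) (pending : Bool),
    (pending = true → flag = 0) →
    (pat.foldl pvFindStep (g, flag, if pending then (1 : Int) else 0)).1
      = g + pvCountTrans pending pat := by
  intro pat
  induction pat with
  | nil => intro g flag pending _; simp [pvCountTrans]
  | cons c rest ih =>
    intro g flag pending hpf
    simp only [List.foldl_cons]
    by_cases hv : c = 'v'
    · have hstep : pvFindStep (g, flag, if pending then (1 : Int) else 0) c = (g, 0, 1) := by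
        simp [pvFindStep, hv]
      rw [hstep, pvCountTrans, if_pos hv]
      have h' := ih g 0 true (fun _ => rfl)
      simpa using h'
    · cases pending with
      | true =>
        have hf := hpf rfl
        have hstep : pvFindStep (g, flag, if (true : Bool) then (1 : Int) else 0) c = (g + 1, flag, 0) := by
          simp [pvFindStep, hv, hf]
        rw [hstep, pvCountTrans, if_neg hv]
        have h' := ih (g + 1) flag false (by simp)
        norm_num at h' ⊢
        rw [h']; ring
      | false =>
        have hstep : pvFindStep (g, flag, if (false : Bool) then (1 : Int) else 0) c = (g, flag, 0) := by
          rw [pvFindStep]; split_ifs <;> simp_all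
        rw [hstep, pvCountTrans, if_neg hv]
        have h' := ih g flag false (by simp)
        norm_num at h' ⊢
        rw [h']

lemma pvCountTrans_eq_zip : ∀ (pat : List Char), (∀ c ∈ pat, c = 'v' ∨ c = 'c') →
    ∀ (pending : Bool), pvCountTrans pending pat = pvZipCount ((if pending then 'v' else 'c') :: pat) := by
  intro pat
  induction pat with
  | nil => intro _ pending; cases pending <;> simp [pvCountTrans, pvZipCount]
  | cons c rest ih =>
    intro hvc pending
    have hcv : c = 'v' ∨ c = 'c' := hvc c (by simp)
    rw [pvZipCount_cons, pvCountTrans]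
    rcases hcv with h | h
    · subst h
      rw [if_pos rfl]
      have h' := ih (fun x hx => hvc x (by simp [hx])) true
      rw [if_pos rfl] at h'
      rw [h']
      cases pending <;> simp
    · subst h
      rw [if_neg (by decide)]
      have h' := ih (fun x hx => hvc x (by simp [hx])) false
      rw [if_neg (by simp)] at h'
      rw [h']
      cases pending <;> simp

lemma pvZipCount_c_cons (pat : List Char) : pvZipCount ('c' :: pat) = pvZipCount pat := by
  cases pat with
  | nil => simp [pvZipCount]
  | cons b rest =>
    rw [pvZipCount_cons, if_neg (fun hh => absurd hh.1 (by decide))]; ring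

lemma pvFind_eq_zip (w : List Char) : pvFind w = pvZipCount (pvCvcPattern w) := by
  have h := pvFindLoop (pvCvcPattern w) 0 1 false (by simp)
  norm_num at h
  have h2 := pvCountTrans_eq_zip (pvCvcPattern w) (pvPattern_vc w) false
  rw [if_neg (by simp)] at h2
  rw [pvFind, h, h2, pvZipCount_c_cons]

-- two-character suffix test ↔ last-two slice ----------------------------------

lemma pvEnds2 (w : List Char) (a b : Char) :
    PySem.Chars.endswith w [a, b] = true ↔ PySem.List.slice w (some (-2)) none = [a, b] := by
  rw [PySem.Chars.endswith_iff, PySem.List.slice_from_neg_ofNat w 2 (by omega)]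
  constructor
  · rintro ⟨t, rfl⟩
    have : (t ++ [a, b]).length - 2 = t.length := by simp
    rw [this, List.drop_left]
  · intro h
    rw [← h]
    exact List.drop_suffix _ _

-- assembly ---------------------------------------------------------------------

set_option maxHeartbeats 2000000 in
lemma pvMain_eq (word : String) : step1b1 word = step1b1_alt word := by
  simp only [step1b1, step1b1_alt]
  by_cases h1 : PySem.Chars.endswith word.toList ['a','t'] = true
  · rcases (PySem.Chars.endswith_iff _ _).mp h1 with ⟨t, ht⟩
    have hsl := (pvEnds2 word.toList 'a' 't').mp h1
    rw [if_pos (show PySem.List.slice word.toList (some (-2)) none ∈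
        ([['a','t'], ['b','l'], ['i','z']] : List (List Char)) from by rw [hsl]; simp)]
    norm_num [pvSuffixLoop, PySem.List.enumerate_cons, PySem.List.enumerate_nil, pvNSuffixes, h1,
      PySem.List.pyGetD_ofNat']
    rw [PySem.List.slice_to_neg_ofNat word.toList 2 (by omega), ← ht]
    have hlen : (t ++ ['a','t']).length - 2 = t.length := by simp
    rw [hlen, List.take_left]
    apply String.toList_injective
    simp [← ht]
  · by_cases h2 : PySem.Chars.endswith word.toList ['b','l'] = true
    · rcases (PySem.Chars.endswith_iff _ _).mp h2 with ⟨t, ht⟩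
      have hsl := (pvEnds2 word.toList 'b' 'l').mp h2
      rw [if_pos (show PySem.List.slice word.toList (some (-2)) none ∈
          ([['a','t'], ['b','l'], ['i','z']] : List (List Char)) from by rw [hsl]; simp)]
      norm_num [pvSuffixLoop, PySem.List.enumerate_cons, PySem.List.enumerate_nil, pvNSuffixes, h1, h2,
        PySem.List.pyGetD_ofNat']
      rw [PySem.List.slice_to_neg_ofNat word.toList 2 (by omega), ← ht]
      have hlen : (t ++ ['b','l']).length - 2 = t.length := by simp
      rw [hlen, List.take_left]
      apply String.toList_injective
      simp [← ht]
    · by_cases h3 : PySem.Chars.endswith word.toList ['i','z'] = true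
      · rcases (PySem.Chars.endswith_iff _ _).mp h3 with ⟨t, ht⟩
        have hsl := (pvEnds2 word.toList 'i' 'z').mp h3
        rw [if_pos (show PySem.List.slice word.toList (some (-2)) none ∈
            ([['a','t'], ['b','l'], ['i','z']] : List (List Char)) from by rw [hsl]; simp)]
        norm_num [pvSuffixLoop, PySem.List.enumerate_cons, PySem.List.enumerate_nil, pvNSuffixes, h1, h2, h3,
          PySem.List.pyGetD_ofNat']
        rw [PySem.List.slice_to_neg_ofNat word.toList 2 (by omega), ← ht]
        have hlen : (t ++ ['i','z']).length - 2 = t.length := by simp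
        rw [hlen, List.take_left]
        apply String.toList_injective
        simp [← ht]
      · have hmem : PySem.List.slice word.toList (some (-2)) none ∉
            ([['a','t'], ['b','l'], ['i','z']] : List (List Char)) := by
          intro hm
          simp only [List.mem_cons, List.mem_singleton] at hm
          rcases hm with h | h | h
          · exact h1 ((pvEnds2 word.toList 'a' 't').mpr h)
          · exact h2 ((pvEnds2 word.toList 'b' 'l').mpr h)
          · exact h3 ((pvEnds2 word.toList 'i' 'z').mpr (by simpa using h))
        rw [if_neg hmem]
        norm_num [pvSuffixLoop, PySem.List.enumerate_cons, PySem.List.enumerate_nil, h1, h2, h3]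
        have hst := pvStream_eq word.toList
        rw [hst]
        have hPlen := pvPattern_length word.toList
        have hlw : word.toList.length = word.length := by simp
        generalize hGP : pvCvcPattern word.toList = P
        rw [hGP] at hPlen
        simp only [pvStateOf]
        have hdl : pvDoubleLetters word.toList = true ↔
            (2 ≤ word.length ∧ PySem.List.pyGet? word.toList (-1) = PySem.List.pyGet? word.toList (-2) ∧
             PySem.List.pyGet? P (-1) = some 'c') := by
          simp only [pvDoubleLetters]
          rw [hGP]
          split_ifs with hL hc <;> simp_all <;> tauto
        have hcvc : pvCvc word.toList = true ↔
            (3 ≤ word.length ∧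
             (¬PySem.List.pyGetD word.toList (-1) ' ' = 'w' ∧ ¬PySem.List.pyGetD word.toList (-1) ' ' = 'x' ∧
              ¬PySem.List.pyGetD word.toList (-1) ' ' = 'y') ∧
             PySem.List.pyGet? P (-1) = some 'c' ∧ PySem.List.pyGet? P (-2) = some 'v' ∧
             PySem.List.pyGet? P (-3) = some 'c') := by
          simp only [pvCvc]
          rw [hGP]
          split_ifs with hL hbad hvc <;> simp_all <;> tauto
        have hfz : pvFind word.toList = pvZipCount P := by
          rw [pvFind_eq_zip, hGP]
        have hb1 : (2 ≤ word.length ∧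
              PySem.List.pyGet? word.toList (-1) = PySem.List.pyGet? word.toList (-2) ∧
                PySem.List.pyGet? P (-1) = some 'c' ∧
                  ¬PySem.List.pyGetD word.toList (-1) ' ' = 'l' ∧
                    ¬PySem.List.pyGetD word.toList (-1) ' ' = 's' ∧
                      ¬PySem.List.pyGetD word.toList (-1) ' ' = 'z') ↔
            (pvDoubleLetters word.toList = true ∧
              ¬PySem.List.pyGetD word.toList (-1) ' ' = 'l' ∧
                ¬PySem.List.pyGetD word.toList (-1) ' ' = 's' ∧
                  ¬PySem.List.pyGetD word.toList (-1) ' ' = 'z') := by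
          rw [hdl]; tauto
        have hb2 : (pvZipCount P = 1 ∧ 3 ≤ word.length ∧
              (¬PySem.List.pyGetD word.toList (-1) ' ' = 'w' ∧
                  ¬PySem.List.pyGetD word.toList (-1) ' ' = 'x' ∧
                    ¬PySem.List.pyGetD word.toList (-1) ' ' = 'y') ∧
                (PySem.List.pyGet? P (-3), PySem.List.pyGet? P (-2), PySem.List.pyGet? P (-1)) =
                  (some 'c', some 'v', some 'c')) ↔
            (pvFind word.toList = 1 ∧ pvCvc word.toList = true) := by
          rw [hcvc, hfz]
          simp only [Prod.mk.injEq]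
          constructor
          · rintro ⟨hm, hL, hbad, hg3, hg2, hg1⟩
            exact ⟨hm, hL, hbad, hg1, hg2, hg3⟩
          · rintro ⟨hm, hL, hbad, hg1, hg2, hg3⟩
            exact ⟨hm, hL, hbad, hg3, hg2, hg1⟩
        exact (if_congr hb1 rfl (if_congr hb2 rfl rfl)).symm

-- ===== VERDICT (by name: the statement is the Claim_ definition above) =====
theorem step1b1_spec : Claim_equal_step1b1 := by
  unfold Claim_equal_step1b1
  intro word _
  unfold Spec_step1b1
  exact pvMain_eq word
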